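-- pv_equiv track=rewrite | github.com/JuliaPelzer/Heat-Plume-Prediction | dataset_loading.py | _build_property_list
-- ===== SOURCE A (Python) =====
-- from typing import List
--
-- def _build_property_list(properties:str) -> List:
--     vars_list = [properties[i] for i in range(len(properties))]
--     for i in vars_list:
--         assert i in ["x", "y", "z", "p", "t", "k"], "input parameter inputs has to be a string of characters, each of which is either x, y, z, p, t, k"
--
--     vars = []
--     if 'x' in vars_list:
--         vars.append("Liquid X-Velocity [m_per_y]")
--     if 'y' in vars_list:
--         vars.append("Liquid Y-Velocity [m_per_y]")
--     if 'z' in vars_list: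
--         vars.append("Liquid Z-Velocity [m_per_y]")
--     if 'p' in vars_list:
--         vars.append("Liquid_Pressure [Pa]") # if structured grid
--         vars.append("Liquid Pressure [Pa]") # if unstructured grid
--     if 't' in vars_list:
--         vars.append("Temperature [C]")
--     if 'k' in vars_list:
--         vars.append("Permeability X [m^2]")
--
--     return vars
-- ===== SOURCE B (Python) =====
-- _ORDER = "xyzptk"
-- _PROPS = {
--     "x": ["Liquid X-Velocity [m_per_y]"],
--     "y": ["Liquid Y-Velocity [m_per_y]"],
--     "z": ["Liquid Z-Velocity [m_per_y]"],
--     "p": ["Liquid_Pressure [Pa]", "Liquid Pressure [Pa]"],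
--     "t": ["Temperature [C]"],
--     "k": ["Permeability X [m^2]"],
-- }
--
-- def _build_property_list(properties):
--     for ch in properties:
--         assert ch in _ORDER, "input parameter inputs has to be a string of characters, each of which is either x, y, z, p, t, k"
--     present = sorted(set(properties), key=_ORDER.index)
--     return [s for c in present for s in _PROPS[c]]
-- ===== Notes on version B (the rewrite author's own statement) =====
-- stated objective: alternative
-- what changed: Replaces the six hardcoded if/append branches by dedup-then-sort: the distinct input characters are sorted by their position in the canonical order 'xyzptk' and flattened through a char-to-properties dict.
-- outside the precondition, e.g. on _build_property_list('a'): A raises AssertionError, B raises AssertionError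
import Mathlib
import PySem

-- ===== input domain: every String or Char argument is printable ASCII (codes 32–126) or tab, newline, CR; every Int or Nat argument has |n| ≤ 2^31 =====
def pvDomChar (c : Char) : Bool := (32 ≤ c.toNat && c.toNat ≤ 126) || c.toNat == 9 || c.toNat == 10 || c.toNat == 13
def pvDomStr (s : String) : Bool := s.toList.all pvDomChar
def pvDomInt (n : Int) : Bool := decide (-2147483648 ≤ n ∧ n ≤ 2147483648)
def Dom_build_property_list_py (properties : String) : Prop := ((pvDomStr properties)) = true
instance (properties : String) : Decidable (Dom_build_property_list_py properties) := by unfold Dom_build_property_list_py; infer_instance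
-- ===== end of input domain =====

-- B replaces A's six hardcoded if/append branches by dedup-then-sort over the canonical order (alternative, same cost).

-- ===== PORT A =====
-- literal port: vars_list = [properties[i] for i in range(len(properties))] (1-char strings ↔ Chars),
-- then the six if-branches appending in A's fixed order; the assert's raising path is outside Pre_.
def build_property_list_py (properties : String) : List String :=
  let vars_list : List Char :=
    (List.range properties.toList.length).map
      (fun i => (PySem.Str.pyGet? properties (Int.ofNat i)).getD ' ')
  let vars : List String := []
  let vars := if vars_list.contains 'x' then vars ++ ["Liquid X-Velocity [m_per_y]"] else vars
  let vars := if vars_list.contains 'y' then vars ++ ["Liquid Y-Velocity [m_per_y]"] else vars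
  let vars := if vars_list.contains 'z' then vars ++ ["Liquid Z-Velocity [m_per_y]"] else vars
  let vars := if vars_list.contains 'p' then vars ++ ["Liquid_Pressure [Pa]", "Liquid Pressure [Pa]"] else vars
  let vars := if vars_list.contains 't' then vars ++ ["Temperature [C]"] else vars
  let vars := if vars_list.contains 'k' then vars ++ ["Permeability X [m^2]"] else vars
  vars

-- ===== PORT B =====
-- _ORDER = "xyzptk" as a char list; _PROPS as an association dict
def pvOrder : List Char := ['x', 'y', 'z', 'p', 't', 'k']

def pvProps : PySem.Dict Char (List String) := .mk
  [ ('x', ["Liquid X-Velocity [m_per_y]"]),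
    ('y', ["Liquid Y-Velocity [m_per_y]"]),
    ('z', ["Liquid Z-Velocity [m_per_y]"]),
    ('p', ["Liquid_Pressure [Pa]", "Liquid Pressure [Pa]"]),
    ('t', ["Temperature [C]"]),
    ('k', ["Permeability X [m^2]"]) ]

-- literal port of B: present = sorted(set(properties), key=_ORDER.index) — the key is injective on the
-- distinct characters, so the sort result is independent of the set's iteration order; under Pre_ every
-- character occurs in _ORDER, so _ORDER.index never raises (getD 0 is never taken) and _PROPS[c] never
-- raises KeyError (getD [] is never taken). The assert's raising path is outside Pre_.
def build_property_list_py_alt (properties : String) : List String :=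
  let present : List Char :=
    PySem.List.sorted (PySem.Set.ofList properties.toList)
      (fun c => (PySem.List.index? pvOrder c).getD 0) false
  present.flatMap (fun c => PySem.Dict.getD pvProps c [])

-- ===== PRECONDITION & SPEC =====
-- Pre_ excludes exactly the inputs with a character outside {x,y,z,p,t,k}, on which A raises AssertionError.
def Pre_build_property_list_py (properties : String) : Prop :=
  (properties.toList.all (fun c => c ∈ ['x', 'y', 'z', 'p', 't', 'k'])) = true
instance (properties : String) : Decidable (Pre_build_property_list_py properties) := by
  unfold Pre_build_property_list_py; infer_instance
def pvWitness_build_property_list_py : String := "ptkx"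

def Spec_build_property_list_py (properties : String) (out : List String) : Prop :=
  out = build_property_list_py_alt properties
instance (properties : String) (out : List String) : Decidable (Spec_build_property_list_py properties out) := by
  unfold Spec_build_property_list_py; infer_instance

-- ===== CLAIM (what is proved, stated in full; the proofs are below) =====
def Claim_equal_build_property_list_py : Prop :=
  ∀ (properties : String), Dom_build_property_list_py properties →
    Pre_build_property_list_py properties →
      Spec_build_property_list_py properties (build_property_list_py properties)

-- ===== LEMMAS AND PROOFS =====

-- the comprehension [properties[i] for i in range(len(properties))] rebuilds the character list
lemma pv_vars_list_eq (properties : String) :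
    (List.range properties.toList.length).map
      (fun i => (PySem.Str.pyGet? properties (Int.ofNat i)).getD ' ') = properties.toList := by
  apply List.ext_getElem
  · simp
  · intro i h1 h2
    simp [List.getElem?_eq_getElem h2]

-- sorting the distinct input characters by their index in pvOrder yields pvOrder filtered to the
-- characters that occur in the input
lemma pv_sorted_eq_filter (cs : List Char) (h : ∀ c ∈ cs, c ∈ pvOrder) :
    PySem.List.sorted (PySem.Set.ofList cs)
      (fun c => (PySem.List.index? pvOrder c).getD 0) false
    = pvOrder.filter (fun c => cs.contains c) := by
  apply PySem.List.sorted_eq_of_perm_of_pairwise_lt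
  · rw [List.perm_ext_iff_of_nodup]
    · intro a
      simp only [List.mem_filter, PySem.Set.mem_ofList, List.contains_iff_mem]
      exact ⟨fun ⟨_, h2⟩ => h2, fun h2 => ⟨h a h2, h2⟩⟩
    · exact List.Nodup.filter _ (by decide)
    · exact PySem.Set.nodup_ofList cs
  · exact List.Pairwise.filter _ (by decide : List.Pairwise _ pvOrder)

-- ===== VERDICT (by name: the statement is the Claim_ definition above) =====
theorem build_property_list_py_spec : Claim_equal_build_property_list_py := by
  intro properties _ hpre
  unfold Spec_build_property_list_py build_property_list_py build_property_list_py_alt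
  rw [pv_vars_list_eq]
  rw [pv_sorted_eq_filter properties.toList (by
    intro c hc
    have := List.all_eq_true.mp hpre c hc
    simpa [pvOrder] using this)]
  simp only [pvOrder, List.filter_cons, List.filter_nil]
  split_ifs <;> simp [List.flatMap, pvProps, PySem.Dict.getD, PySem.Dict.get?]
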